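-- pv_equiv track=rewrite | github.com/koaeH/JMdict-sdcv | k/util/maya.py | post_pixi_of
-- ===== SOURCE A (Python) =====
-- def post_pixi_of(mako, i):
--     n = i
--     for x in range(i + 1, len(mako)):
--         if mako[x] >> 24 & 0xF:
--             if n > i:
--                 yield n, x
--
--             n = x
--
--     if n > i:
--         if mako[n] >> 24 & 0xF:
--             yield n, len(mako)
-- ===== SOURCE B (Python) =====
-- def post_pixi_of(mako, i):
--     # Two-phase: collect marker indices first, then emit consecutive windows
--     # (each marker paired with the next one, the last with len(mako)).
--     marks = [x for x in range(i + 1, len(mako)) if mako[x] >> 24 & 0xF]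
--     yield from zip(marks, marks[1:] + [len(mako)])
-- ===== Notes on version B (the rewrite author's own statement) =====
-- stated objective: simpler
-- what changed: Replaces the interleaved single pass with carried state n and a trailing re-test by a two-phase collect-then-window form: gather marker indices, then pair each with its successor (the last with len(mako)).
import Mathlib
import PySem

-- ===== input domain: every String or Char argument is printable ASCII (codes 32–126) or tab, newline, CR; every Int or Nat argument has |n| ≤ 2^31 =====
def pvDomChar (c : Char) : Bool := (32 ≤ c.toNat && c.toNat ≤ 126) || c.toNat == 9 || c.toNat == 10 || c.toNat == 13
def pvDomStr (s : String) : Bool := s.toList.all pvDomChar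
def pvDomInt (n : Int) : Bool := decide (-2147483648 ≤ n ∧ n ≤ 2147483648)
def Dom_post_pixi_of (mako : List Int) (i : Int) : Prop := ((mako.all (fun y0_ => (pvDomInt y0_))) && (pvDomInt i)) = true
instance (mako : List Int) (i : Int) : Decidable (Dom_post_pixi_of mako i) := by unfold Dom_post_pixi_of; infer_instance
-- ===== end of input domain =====

-- B replaces A's interleaved single pass (carried previous-marker state n and a
-- trailing re-test) by a two-phase collect-then-window form: gather the marker
-- indices, then pair each with its successor (the last with len(mako)). Objective: simpler.

-- the marker test 'mako[x] >> 24 & 0xF' shared by both sources (pyGetD: in range under Pre_)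
def pvMark (mako : List Int) (x : Int) : Bool :=
  PySem.Int.band (PySem.List.pyGetD mako x 0 >>> 24) 15 ≠ 0

-- ===== PORT A =====
-- loop body: 'if mako[x] >> 24 & 0xF: (if n > i: yield n, x); n = x'
def pvStepA (mako : List Int) (i : Int) (st : Int × List (Int × Int)) (x : Int) :
    Int × List (Int × Int) :=
  if pvMark mako x then (x, if st.1 > i then st.2 ++ [(st.1, x)] else st.2) else st

-- trailing 'if n > i: if mako[n] >> 24 & 0xF: yield n, len(mako)'
def pvFinishA (mako : List Int) (i : Int) (st : Int × List (Int × Int)) : List (Int × Int) :=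
  if st.1 > i then (if pvMark mako st.1 then st.2 ++ [(st.1, (mako.length : Int))] else st.2)
  else st.2

def post_pixi_of (mako : List Int) (i : Int) : List (Int × Int) :=
  pvFinishA mako i
    ((PySem.List.pyRange (i + 1) (mako.length : Int) 1).foldl (pvStepA mako i) (i, []))

-- ===== PORT B =====
def post_pixi_of_alt (mako : List Int) (i : Int) : List (Int × Int) :=
  let marks := (PySem.List.pyRange (i + 1) (mako.length : Int) 1).filter (pvMark mako)
  marks.zip (marks.drop 1 ++ [(mako.length : Int)])

-- ===== PRECONDITION & SPEC =====
-- Pre_ excludes exactly the inputs where Python A raises IndexError: a nonempty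
-- scan range whose start i+1 lies below -len(mako) (B raises identically there).
def Pre_post_pixi_of (mako : List Int) (i : Int) : Prop :=
  (mako.length : Int) ≤ i + 1 ∨ -(mako.length : Int) ≤ i + 1
instance (mako : List Int) (i : Int) : Decidable (Pre_post_pixi_of mako i) := by
  unfold Pre_post_pixi_of; infer_instance

def pvWitness_post_pixi_of : List Int × Int := ([16777216, 5, 16777216], 0)

def Spec_post_pixi_of (mako : List Int) (i : Int) (out : List (Int × Int)) : Prop :=
  out = post_pixi_of_alt mako i
instance (mako : List Int) (i : Int) (out : List (Int × Int)) :
    Decidable (Spec_post_pixi_of mako i out) := by unfold Spec_post_pixi_of; infer_instance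

-- ===== CLAIM (what is proved, stated in full; the proofs are below) =====
def Claim_equal_post_pixi_of : Prop := ∀ (mako : List Int) (i : Int),
  Dom_post_pixi_of mako i → Pre_post_pixi_of mako i →
  Spec_post_pixi_of mako i (post_pixi_of mako i)

-- ===== LEMMAS AND PROOFS =====

-- the common normal form: consecutive pairs of a list, closed by e
def pvPairs : List Int → Int → List (Int × Int)
  | [], _ => []
  | [a], e => [(a, e)]
  | a :: b :: t, e => (a, b) :: pvPairs (b :: t) e

theorem pvZip_eq_pairs (l : List Int) (e : Int) :
    l.zip (l.drop 1 ++ [e]) = pvPairs l e := by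
  induction l with
  | nil => simp [pvPairs]
  | cons a t ih =>
    cases t with
    | nil => simp [pvPairs]
    | cons b t' => simpa [pvPairs] using congrArg (List.cons (a, b)) ih

theorem pvFoldA_marked (mako : List Int) (i : Int) (r : List Int) :
    ∀ (n : Int) (acc : List (Int × Int)), i < n → pvMark mako n = true →
    (∀ x ∈ r, i < x) →
    pvFinishA mako i (r.foldl (pvStepA mako i) (n, acc)) =
      acc ++ pvPairs (n :: r.filter (pvMark mako)) (mako.length : Int) := by
  induction r with
  | nil =>
    intro n acc hn hPn _
    simp [pvFinishA, pvPairs, hn, hPn]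
  | cons x t ih =>
    intro n acc hn hPn hmem
    by_cases hx : pvMark mako x = true
    · have hix : i < x := hmem x (List.mem_cons_self ..)
      have hst : pvStepA mako i (n, acc) x = (x, acc ++ [(n, x)]) := by
        simp [pvStepA, hx, hn]
      rw [List.foldl_cons, hst,
        ih x (acc ++ [(n, x)]) hix hx (fun y hy => hmem y (List.mem_cons_of_mem _ hy)),
        List.filter_cons_of_pos hx]
      simp [pvPairs]
    · have hst : pvStepA mako i (n, acc) x = (n, acc) := by simp [pvStepA, hx]
      rw [List.foldl_cons, hst,
        ih n acc hn hPn (fun y hy => hmem y (List.mem_cons_of_mem _ hy)),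
        List.filter_cons_of_neg hx]

theorem pvFoldA_start (mako : List Int) (i : Int) (r : List Int) :
    ∀ (acc : List (Int × Int)), (∀ x ∈ r, i < x) →
    pvFinishA mako i (r.foldl (pvStepA mako i) (i, acc)) =
      acc ++ pvPairs (r.filter (pvMark mako)) (mako.length : Int) := by
  induction r with
  | nil => intro acc _; simp [pvFinishA, pvPairs]
  | cons x t ih =>
    intro acc hmem
    by_cases hx : pvMark mako x = true
    · have hix : i < x := hmem x (List.mem_cons_self ..)
      have hst : pvStepA mako i (i, acc) x = (x, acc) := by simp [pvStepA, hx]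
      rw [List.foldl_cons, hst,
        pvFoldA_marked mako i t x acc hix hx (fun y hy => hmem y (List.mem_cons_of_mem _ hy)),
        List.filter_cons_of_pos hx]
    · have hst : pvStepA mako i (i, acc) x = (i, acc) := by simp [pvStepA, hx]
      rw [List.foldl_cons, hst, ih acc (fun y hy => hmem y (List.mem_cons_of_mem _ hy)),
        List.filter_cons_of_neg hx]

-- ===== VERDICT (by name: the statement is the Claim_ definition above) =====
theorem post_pixi_of_spec : Claim_equal_post_pixi_of := by
  intro mako i _ _
  unfold Spec_post_pixi_of post_pixi_of post_pixi_of_alt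
  rw [pvFoldA_start mako i _ [] (by
    intro x hx
    have := (PySem.List.mem_pyRange_one (a := i + 1) (b := (mako.length : Int))).1 hx
    omega)]
  rw [pvZip_eq_pairs]
  simp
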